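-- pv_equiv track=rewrite | github.com/a-maksimov/stepik_algos | algorithms_count_animals.py | count_animals
-- ===== SOURCE A (Python) =====
-- def count_animals(heads, legs):
--     if not heads and not legs:
--         return 0, 0
--
--     if heads and not legs or legs and not heads:
--         return None
--
--     if legs % 2 != 0:
--         return None
--
--     for x_ducks in range(heads + 1):
--         x_rabbits = heads - x_ducks
--         x_ducks = (legs - x_rabbits * 4) // 2
--         if x_ducks < 0:
--             continue
--
--         if x_ducks + x_rabbits == heads:
--             return x_ducks, x_rabbits
--
--     return None
-- ===== SOURCE B (Python) =====
-- def count_animals(heads, legs):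
--     # Solve the 2x2 system d + r = heads, 2d + 4r = legs in closed form.
--     if legs % 2 != 0:
--         return None
--     half = legs // 2
--     ducks = 2 * heads - half
--     rabbits = half - heads
--     if ducks >= 0 and rabbits >= 0:
--         return ducks, rabbits
--     return None
-- ===== Notes on version B (the rewrite author's own statement) =====
-- stated objective: faster
-- what changed: Replaced the O(heads) search loop by the closed-form solution of the linear system d+r=heads, 2d+4r=legs with non-negativity checks.
import Mathlib
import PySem

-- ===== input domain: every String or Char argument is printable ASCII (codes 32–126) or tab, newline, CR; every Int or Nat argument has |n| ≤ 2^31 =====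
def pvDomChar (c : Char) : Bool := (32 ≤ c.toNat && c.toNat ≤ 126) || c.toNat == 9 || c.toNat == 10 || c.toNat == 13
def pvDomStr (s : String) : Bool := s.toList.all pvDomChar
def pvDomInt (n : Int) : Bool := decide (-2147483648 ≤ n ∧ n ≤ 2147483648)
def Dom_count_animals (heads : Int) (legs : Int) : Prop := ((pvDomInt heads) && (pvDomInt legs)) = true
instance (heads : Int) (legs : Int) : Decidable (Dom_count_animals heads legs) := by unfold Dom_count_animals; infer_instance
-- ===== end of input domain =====

-- B replaces A's linear search over all duck counts by the O(1) closed-form solution of the 2x2 linear system.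

-- ===== PORT A =====
-- the 'for x_ducks in range(heads + 1)' loop, iterating over the remaining range elements
def countAnimalsLoop (heads : Int) (legs : Int) : List Int → Option (List Int)
  | [] => none
  | i :: rest =>
    let x_rabbits := heads - i
    let x_ducks := PySem.Int.floordiv (legs - x_rabbits * 4) 2
    if x_ducks < 0 then countAnimalsLoop heads legs rest
    else if x_ducks + x_rabbits = heads then some [x_ducks, x_rabbits]
    else countAnimalsLoop heads legs rest

def count_animals (heads : Int) (legs : Int) : Option (List Int) :=
  if heads = 0 ∧ legs = 0 then some [0, 0]
  else if (heads ≠ 0 ∧ legs = 0) ∨ (legs ≠ 0 ∧ heads = 0) then none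
  else if PySem.Int.mod legs 2 ≠ 0 then none
  else countAnimalsLoop heads legs (PySem.List.pyRange 0 (heads + 1) 1)

-- ===== PORT B =====
def count_animals_alt (heads : Int) (legs : Int) : Option (List Int) :=
  if PySem.Int.mod legs 2 ≠ 0 then none
  else
    let half := PySem.Int.floordiv legs 2
    let ducks := 2 * heads - half
    let rabbits := half - heads
    if ducks ≥ 0 ∧ rabbits ≥ 0 then some [ducks, rabbits] else none

-- ===== PRECONDITION & SPEC =====
def Spec_count_animals (heads : Int) (legs : Int) (out : Option (List Int)) : Prop := out = count_animals_alt heads legs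
instance (heads : Int) (legs : Int) (out : Option (List Int)) : Decidable (Spec_count_animals heads legs out) := by unfold Spec_count_animals; infer_instance

-- ===== CLAIM (what is proved, stated in full; the proofs are below) =====
def Claim_equal_count_animals : Prop := ∀ (heads : Int) (legs : Int), Dom_count_animals heads legs → Spec_count_animals heads legs (count_animals heads legs)

-- ===== LEMMAS AND PROOFS =====

-- For even legs = 2*m, the loop returns iff the unique solution index 2*heads - m is in the
-- remaining range (and is nonnegative), and then returns exactly the closed-form pair.
theorem countAnimalsLoop_char (heads m : Int) (l : List Int) :
    countAnimalsLoop heads (2 * m) l =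
      if (2 * heads - m) ∈ l ∧ 0 ≤ 2 * heads - m then some [2 * heads - m, m - heads] else none := by
  induction l with
  | nil => simp [countAnimalsLoop]
  | cons i rest ih =>
    have hdiv : PySem.Int.floordiv (2 * m - (heads - i) * 4) 2 = m - 2 * (heads - i) := by
      rw [PySem.Int.floordiv_eq_ediv_of_pos (by norm_num)]
      omega
    simp only [countAnimalsLoop, hdiv]
    by_cases hlt : m - 2 * (heads - i) < 0
    · rw [if_pos hlt, ih]
      have hcond : (2 * heads - m ∈ i :: rest ∧ 0 ≤ 2 * heads - m) ↔
          (2 * heads - m ∈ rest ∧ 0 ≤ 2 * heads - m) := by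
        simp only [List.mem_cons]
        constructor
        · rintro ⟨h1 | h1, h2⟩
          · exfalso; omega
          · exact ⟨h1, h2⟩
        · exact fun ⟨h1, h2⟩ => ⟨Or.inr h1, h2⟩
      rw [(if_congr hcond rfl rfl : _)]
    · rw [if_neg hlt]
      by_cases heq : m - 2 * (heads - i) + (heads - i) = heads
      · have hi : i = 2 * heads - m := by omega
        rw [if_pos heq, if_pos ⟨by simp [hi], by omega⟩]
        have e1 : m - 2 * (heads - i) = 2 * heads - m := by omega
        have e2 : heads - i = m - heads := by omega
        rw [e1, e2]
      · rw [if_neg heq, ih]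
        have hcond : (2 * heads - m ∈ i :: rest ∧ 0 ≤ 2 * heads - m) ↔
            (2 * heads - m ∈ rest ∧ 0 ≤ 2 * heads - m) := by
          simp only [List.mem_cons]
          constructor
          · rintro ⟨h1 | h1, h2⟩
            · exfalso; omega
            · exact ⟨h1, h2⟩
          · exact fun ⟨h1, h2⟩ => ⟨Or.inr h1, h2⟩
        rw [(if_congr hcond rfl rfl : _)]

-- ===== VERDICT (by name: the statement is the Claim_ definition above) =====
theorem count_animals_spec : Claim_equal_count_animals := by
  intro heads legs _
  unfold Spec_count_animals count_animals count_animals_alt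
  have hmod : PySem.Int.mod legs 2 = legs % 2 := PySem.Int.mod_eq_emod_of_pos (by norm_num)
  have hdiv : PySem.Int.floordiv legs 2 = legs / 2 := PySem.Int.floordiv_eq_ediv_of_pos (by norm_num)
  by_cases hzz : heads = 0 ∧ legs = 0
  · obtain ⟨h1, h2⟩ := hzz
    subst h1; subst h2
    norm_num [PySem.Int.mod, PySem.Int.floordiv]
  · rw [if_neg hzz]
    by_cases hone : (heads ≠ 0 ∧ legs = 0) ∨ (legs ≠ 0 ∧ heads = 0)
    · rw [if_pos hone]
      rw [hmod, hdiv]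
      rcases hone with ⟨hh, hl⟩ | ⟨hl, hh⟩
      · subst hl
        norm_num
        omega
      · subst hh
        by_cases he : legs % 2 = 0
        · rw [if_neg (by simpa using he)]
          have : ¬ (0 ≤ 2 * 0 - legs / 2 ∧ 0 ≤ legs / 2 - 0) := by omega
          simp only [if_neg this]
        · rw [if_pos (by simpa using he)]
    · rw [if_neg hone]
      rw [hmod, hdiv]
      by_cases he : legs % 2 = 0
      · rw [if_neg (by simpa using he), if_neg (by simpa using he)]
        have hlegs : legs = 2 * (legs / 2) := by omega
        rw [hlegs, countAnimalsLoop_char]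
        have h2 : 2 * (legs / 2) / 2 = legs / 2 := by omega
        simp only [PySem.List.mem_pyRange_one, h2]
        split_ifs <;> first | rfl | omega
      · rw [if_pos (by simpa using he), if_pos (by simpa using he)]
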